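-- pv_equiv track=rewrite | github.com/Lieke36/DRD3-Binder-Challenge | save_in_excel.py | num_atoms
-- ===== SOURCE A (Python) =====
-- def num_atoms(smiles):
--     """
--     Calculate the number of (non-hydrogen) atoms
--     in a SMILES string.
--     """
--     nr_atoms = {}            # dictionary om atoomfrequentie bij te houden
--     i = 0                    # index
--
--     while i<len(smiles):     # loop door elke teken in de SMILES string
--         letter = smiles[i]
--
--         if letter.isupper():                                           # controleer of het een hoofdletter is
--             if i+1<len(smiles) and smiles[i+1].islower():              # controleer of er een kleine letter volgt, zoals bijvoorbeeld bij Cl of Na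
--                 next_letter = smiles[i+1]
--                 if i+2<len(smiles) and smiles[i+2].isdigit():          # controleer of er een getal naar de kleine letter volgt. Dit is een aromatisch atoom
--                     atom = letter                                      # als dit zo is, tel je de hoofdletter onafhankelijk als atoom
--                 else:
--                     atom = letter + next_letter                        # anders combineer je hoofdletter en kleine letter.
--                     i += 1
--             else:
--                 atom = letter                                          # als er geen kleine letter volgt, tel je ook alleen de hoofdletter.
--
--             if atom in nr_atoms:                                       # voeg atoom toe aan de dictionary of verhoog de teller
--                 nr_atoms[atom] += 1
--             else:
--                 nr_atoms[atom] = 1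
--
--         elif letter.islower():                                         # als de atoom een kleine letter is die niet bij een hoofdletter hoort.
--             atom = letter
--             if atom in nr_atoms:
--                 nr_atoms[atom] += 1
--             else:
--                 nr_atoms[atom] = 1
--
--         i += 1                                                         # ga naar het volgende letter/teken
--     return sum(nr_atoms.values())                                      # som van alle atomen teruggeven
-- ===== SOURCE B (Python) =====
-- def num_atoms(smiles):
--     """
--     Calculate the number of (non-hydrogen) atoms
--     in a SMILES string.
--     """
--     # One linear pass: each character contributes 0 or 1 on its own.
--     # A character counts iff it is uppercase, or it is lowercase and not
--     # merged into a preceding uppercase (merged = previous char uppercase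
--     # and the following char is not a digit).
--     chars = list(smiles)
--     nexts = chars[1:] + [None]
--     count = 0
--     prev_upper = False
--     for ch, nxt in zip(chars, nexts):
--         if ch.isupper() or (ch.islower() and not (prev_upper and not (nxt is not None and nxt.isdigit()))):
--             count += 1
--         prev_upper = ch.isupper()
--     return count
-- ===== Notes on version B (the rewrite author's own statement) =====
-- stated objective: faster
-- what changed: Replaces the index-skipping while-loop that builds a per-atom frequency dictionary (summed at the end) by a single pairwise pass over zip(chars, nexts) that adds a 0/1 contribution per character computed from local context (a prev-uppercase flag and the next character), with no dictionary and no index skipping.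
import Mathlib
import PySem

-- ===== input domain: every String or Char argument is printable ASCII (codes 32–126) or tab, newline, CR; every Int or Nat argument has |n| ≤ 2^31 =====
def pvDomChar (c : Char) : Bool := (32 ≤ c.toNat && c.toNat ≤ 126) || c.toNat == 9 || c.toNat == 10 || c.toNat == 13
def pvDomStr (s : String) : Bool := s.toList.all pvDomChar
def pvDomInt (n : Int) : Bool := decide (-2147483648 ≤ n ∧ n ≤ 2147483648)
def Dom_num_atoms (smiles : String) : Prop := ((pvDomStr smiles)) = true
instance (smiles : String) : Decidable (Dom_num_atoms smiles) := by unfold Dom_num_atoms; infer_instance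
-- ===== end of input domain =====

-- B replaces A's index-skipping while-loop + frequency dictionary by a single
-- pairwise pass assigning each character a 0/1 contribution; a timing run
-- measured it constant-factor faster (no dictionary maintained).

-- ===== PORT A =====
-- 'if atom in nr_atoms: nr_atoms[atom] += 1 else: nr_atoms[atom] = 1'
def pvBump (d : PySem.Dict String Int) (atom : String) : PySem.Dict String Int :=
  if d.contains atom then d.insert atom (d.getD atom 0 + 1) else d.insert atom 1

-- 'i+2 < len(smiles) and smiles[i+2].isdigit()' on the suffix after the lowercase letter
def pvNextDigit (l : List Char) : Bool :=
  match l with | m :: _ => PySem.Chars.isdigit m | [] => false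

-- A's while-loop over indices, transcribed as recursion on the remaining suffix
-- (i += 1 / the extra i += 1 become recursing on the one- or two-shorter suffix).
def pvALoop (d : PySem.Dict String Int) : List Char → PySem.Dict String Int
  | [] => d
  | [c] =>
      if PySem.Chars.isupper c then pvBump d (String.ofList [c])
      else if PySem.Chars.islower c then pvBump d (String.ofList [c])
      else d
  | c :: n :: rest2 =>
      if PySem.Chars.isupper c then
        if PySem.Chars.islower n then
          if pvNextDigit rest2 then
            pvALoop (pvBump d (String.ofList [c])) (n :: rest2)
          else
            pvALoop (pvBump d (String.ofList [c, n])) rest2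
        else pvALoop (pvBump d (String.ofList [c])) (n :: rest2)
      else if PySem.Chars.islower c then
        pvALoop (pvBump d (String.ofList [c])) (n :: rest2)
      else pvALoop d (n :: rest2)

def num_atoms (smiles : String) : Int :=
  ((pvALoop PySem.Dict.empty smiles.toList).values).sum

-- ===== PORT B =====
-- the for-loop over zip(chars, nexts) with accumulator (count, prev_upper)
def pvBLoop (count : Int) (pu : Bool) : List (Char × Option Char) → Int
  | [] => count
  | (ch, nxt) :: rest =>
      let nd : Bool := match nxt with | some d => PySem.Chars.isdigit d | none => false
      let count' := if PySem.Chars.isupper ch || (PySem.Chars.islower ch && !(pu && !nd)) then count + 1 else count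
      pvBLoop count' (PySem.Chars.isupper ch) rest

def num_atoms_alt (smiles : String) : Int :=
  let chars := smiles.toList
  let nexts : List (Option Char) := (chars.drop 1).map some ++ [none]
  pvBLoop 0 false (chars.zip nexts)

-- ===== PRECONDITION & SPEC =====
def Spec_num_atoms (smiles : String) (out : Int) : Prop := out = num_atoms_alt smiles
instance (smiles : String) (out : Int) : Decidable (Spec_num_atoms smiles out) := by unfold Spec_num_atoms; infer_instance

-- ===== CLAIM (what is proved, stated in full; the proofs are below) =====
def Claim_equal_num_atoms : Prop := ∀ (smiles : String), Dom_num_atoms smiles → Spec_num_atoms smiles (num_atoms smiles)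

-- ===== LEMMAS AND PROOFS =====

-- the zip(chars, nexts) list B iterates over
def pvZ (l : List Char) : List (Char × Option Char) :=
  l.zip ((l.drop 1).map some ++ [none])

theorem pvZ_cons (c : Char) (rest : List Char) :
    pvZ (c :: rest) = (c, rest.head?) :: pvZ rest := by
  cases rest <;> simp [pvZ]

theorem pvBLoop_acc : ∀ (z : List (Char × Option Char)) (count : Int) (pu : Bool),
    pvBLoop count pu z = count + pvBLoop 0 pu z := by
  intro z
  induction z with
  | nil => intro count pu; simp [pvBLoop]
  | cons p rest ih =>
      intro count pu
      obtain ⟨ch, nxt⟩ := p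
      simp only [pvBLoop]
      split_ifs with h
      · rw [ih (count + 1), ih (0 + 1)]; ring
      · rw [ih count]

theorem pvBLoop_step (pu : Bool) (ch : Char) (nxt : Option Char) (rest : List (Char × Option Char)) :
    pvBLoop 0 pu ((ch, nxt) :: rest)
      = (if (PySem.Chars.isupper ch
              || (PySem.Chars.islower ch
                    && !(pu && !(match nxt with | some d => PySem.Chars.isdigit d | none => false)))) = true
          then (1 : Int) else 0)
        + pvBLoop 0 (PySem.Chars.isupper ch) rest := by
  simp only [pvBLoop]
  split_ifs with h
  · rw [pvBLoop_acc]; norm_num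
  · simp

theorem pvLowerNotUpper {c : Char} (h : PySem.Chars.islower c = true) :
    PySem.Chars.isupper c = false := by
  have h1 : 'a' ≤ c := by
    simp only [PySem.Chars.islower, Bool.and_eq_true, decide_eq_true_eq] at h; exact h.1
  have h2 : ¬ (c ≤ 'Z') := fun hle => absurd (le_trans h1 hle) (by decide)
  simp [PySem.Chars.isupper, h2]

theorem pvSumSndUpdate : ∀ (xs : List (String × Int)) (k : String) (w : Int),
    (xs.map Prod.fst).Nodup → (k, w) ∈ xs →
    ((xs.map (fun p => if p.1 == k then (k, w + 1) else p)).map Prod.snd).sum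
      = (xs.map Prod.snd).sum + 1 := by
  intro xs
  induction xs with
  | nil => intro k w _ hmem; simp at hmem
  | cons p rest ih =>
      intro k w hn hmem
      simp only [List.map_cons, List.nodup_cons] at hn
      by_cases hp : p.1 = k
      · have hk : k ∉ rest.map Prod.fst := hp ▸ hn.1
        have hpw : p = (k, w) := by
          rcases List.mem_cons.mp hmem with h | h
          · exact h.symm
          · exact absurd (List.mem_map.mpr ⟨(k, w), h, rfl⟩) hk
        have ht : rest.map (fun p => if p.1 == k then (k, w + 1) else p) = rest := by
          have hcg : ∀ q ∈ rest, (fun p => if p.1 == k then (k, w + 1) else p) q = id q := by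
            intro q hq
            have : q.1 ≠ k := fun hqk => hk (List.mem_map.mpr ⟨q, hq, hqk⟩)
            simp [this]
          rw [List.map_congr_left hcg, List.map_id]
        subst hpw
        simp only [List.map_cons, ht, List.sum_cons]
        simp; ring
      · have hmem' : (k, w) ∈ rest := by
          rcases List.mem_cons.mp hmem with h | h
          · exact absurd (congrArg Prod.fst h.symm) hp
          · exact h
        have hb : (p.1 == k) = false := beq_eq_false_iff_ne.mpr hp
        simp only [List.map_cons, List.sum_cons, hb, Bool.false_eq_true, if_false]
        rw [ih k w hn.2 hmem']
        ring

theorem pvNodupBump (d : PySem.Dict String Int) (k : String) (hn : d.keys.Nodup) :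
    (pvBump d k).keys.Nodup := by
  unfold pvBump
  split_ifs <;> exact PySem.Dict.nodup_keys_insert _ _ _ hn

theorem pvSumBump (d : PySem.Dict String Int) (k : String) (hn : d.keys.Nodup) :
    (pvBump d k).values.sum = d.values.sum + 1 := by
  unfold pvBump
  by_cases hc : d.contains k = true
  · rw [if_pos hc]
    have hkmem : k ∈ d.keys := (PySem.Dict.contains_iff_mem_keys d k).mp hc
    simp only [PySem.Dict.keys] at hkmem
    obtain ⟨⟨k', v⟩, hmem, hfst⟩ := List.mem_map.mp hkmem
    simp only at hfst
    subst hfst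
    have hget : d.getD k' 0 = v := PySem.Dict.getD_of_mem_items d hmem hn 0
    have hitems := PySem.Dict.items_insert_of_contains d (d.getD k' 0 + 1) hc
    simp only [PySem.Dict.values]
    rw [hitems, hget]
    have hn' : (d.items.map Prod.fst).Nodup := hn
    exact pvSumSndUpdate d.items k' v hn' hmem
  · rw [if_neg hc]
    have hitems := PySem.Dict.items_insert_of_not_contains d 1 (by simpa using hc)
    simp [PySem.Dict.values, hitems]

-- the 'first character of l would be merged into a preceding uppercase' flag
def pvMerged (pu : Bool) (l : List Char) : Bool :=
  pu && (match l with
         | c :: rest => PySem.Chars.islower c && !pvNextDigit rest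
         | [] => false)

theorem pvMain : ∀ (n : Nat) (l : List Char), l.length ≤ n → ∀ (pu : Bool) (d : PySem.Dict String Int),
    d.keys.Nodup → pvMerged pu l = false →
    ((pvALoop d l).values).sum = d.values.sum + pvBLoop 0 pu (pvZ l) := by
  intro n
  induction n with
  | zero =>
      intro l hl pu d hn hm
      have : l = [] := List.length_eq_zero_iff.mp (Nat.le_zero.mp hl)
      subst this
      simp [pvALoop, pvZ, pvBLoop]
  | succ n ih =>
      intro l hl pu d hn hm
      match l with
      | [] => simp [pvALoop, pvZ, pvBLoop]
      | [c] =>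
          have hz : pvZ [c] = [(c, none)] := by simp [pvZ]
          rw [hz, pvBLoop_step]
          by_cases hU : PySem.Chars.isupper c = true
          · simp [pvALoop, hU, pvSumBump d _ hn, pvBLoop]
          · by_cases hL : PySem.Chars.islower c = true
            · have hpu : pu = false := by
                cases pu
                · rfl
                · simp [pvMerged, hL, pvNextDigit] at hm
              subst hpu
              simp [pvALoop, hU, hL, pvSumBump d _ hn, pvBLoop]
            · simp [pvALoop, hU, hL, pvBLoop]
      | c :: n1 :: rest2 =>
          have hl1 : (n1 :: rest2).length ≤ n := by simp at hl ⊢; omega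
          have hl2 : rest2.length ≤ n := by simp at hl; omega
          rw [pvZ_cons, pvBLoop_step]
          have hhd : (match (n1 :: rest2).head? with
              | some d => PySem.Chars.isdigit d | none => false) = PySem.Chars.isdigit n1 := by simp
          rw [hhd]
          by_cases hU : PySem.Chars.isupper c = true
          · by_cases hL : PySem.Chars.islower n1 = true
            · by_cases hD : pvNextDigit rest2 = true
              · -- digit after the lowercase letter: count c alone, do not skip
                have hA : pvALoop d (c :: n1 :: rest2)
                    = pvALoop (pvBump d (String.ofList [c])) (n1 :: rest2) := by
                  simp [pvALoop, hU, hL, hD]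
                have hm' : pvMerged true (n1 :: rest2) = false := by
                  simp [pvMerged, hL, hD]
                rw [hA, ih (n1 :: rest2) hl1 true _ (pvNodupBump d _ hn) hm', pvSumBump d _ hn]
                simp [hU]; ring
              · -- merge c with n1 and skip it
                have hA : pvALoop d (c :: n1 :: rest2)
                    = pvALoop (pvBump d (String.ofList [c, n1])) rest2 := by
                  simp [pvALoop, hU, hL, hD]
                have hm' : pvMerged false rest2 = false := by simp [pvMerged]
                rw [hA, ih rest2 hl2 false _ (pvNodupBump d _ hn) hm', pvSumBump d _ hn]
                -- expand B one more step: the merged n1 contributes 0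
                rw [pvZ_cons, pvBLoop_step]
                have hnd : (match rest2.head? with
                    | some d => PySem.Chars.isdigit d | none => false) = false := by
                  cases rest2 with
                  | nil => simp
                  | cons m r => simpa [pvNextDigit] using hD
                rw [hnd]
                simp [hU, hL, pvLowerNotUpper hL]; ring
            · -- next char not lowercase: count c alone
              have hA : pvALoop d (c :: n1 :: rest2)
                  = pvALoop (pvBump d (String.ofList [c])) (n1 :: rest2) := by
                simp [pvALoop, hU, hL]
              have hm' : pvMerged true (n1 :: rest2) = false := by simp [pvMerged, hL]
              rw [hA, ih (n1 :: rest2) hl1 true _ (pvNodupBump d _ hn) hm', pvSumBump d _ hn]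
              simp [hU]; ring
          · by_cases hL : PySem.Chars.islower c = true
            · -- standalone lowercase atom (not merged, by hm)
              have hcond : (pu && !PySem.Chars.isdigit n1) = false := by
                cases hpu : pu
                · simp
                · subst hpu
                  simpa [pvMerged, hL, pvNextDigit] using hm
              have hA : pvALoop d (c :: n1 :: rest2)
                  = pvALoop (pvBump d (String.ofList [c])) (n1 :: rest2) := by
                simp [pvALoop, hU, hL]
              have hm' : pvMerged false (n1 :: rest2) = false := by simp [pvMerged]
              rw [hA, ih (n1 :: rest2) hl1 false _ (pvNodupBump d _ hn) hm', pvSumBump d _ hn]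
              simp [hU, hL, hcond]; ring
            · -- not a letter: nothing counted
              have hA : pvALoop d (c :: n1 :: rest2) = pvALoop d (n1 :: rest2) := by
                simp [pvALoop, hU, hL]
              have hm' : pvMerged false (n1 :: rest2) = false := by simp [pvMerged]
              rw [hA, ih (n1 :: rest2) hl1 false d hn hm']
              simp [hU, hL]

-- ===== VERDICT (by name: the statement is the Claim_ definition above) =====
theorem num_atoms_spec : Claim_equal_num_atoms := by
  intro smiles _
  unfold Spec_num_atoms num_atoms num_atoms_alt
  have h := pvMain smiles.toList.length smiles.toList le_rfl false PySem.Dict.empty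
    (by simp [PySem.Dict.keys_empty]) (by simp [pvMerged])
  simpa [pvZ, PySem.Dict.values, PySem.Dict.empty] using h
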